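-- pv_equiv track=rewrite | github.com/adendorffy/acoustic-units | dist.py | get_batch_of_paths
-- ===== SOURCE A (Python) =====
-- from typing import Generator, List, Tuple, Dict
--
-- def pair_generator(
--     num_paths: int, start: int = 0
-- ) -> Generator[Tuple[int, int], None, None]:
--     """
--     Generator function that yields all unique index pairs (i, j)
--     where i < j. This ensures each pair is processed only once.
--     """
--
--     for i in range(start, num_paths):
--         for j in range(i + 1, num_paths):
--             yield i, j
--
-- def get_batch_of_paths(
--     num_paths: int, chunk_limit: int = 5000000
-- ) -> Generator[List[Tuple[int, int]], None, None]:
--     """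
--     Creates and yields chunks of index pairs for processing.
--
--     Args:
--         num_paths (int): Number of paths (features) to process.
--         chunk_limit (int): Maximum number of pairs in each chunk.
--
--     Yields:
--         List of tuples containing index pairs (i, j).
--     """
--     pairs = pair_generator(num_paths)
--     chunk: List[Tuple[int, int]] = []
--
--     for idx, (i, j) in enumerate(pairs, 1):
--         chunk.append((i, j))
--
--         if idx % chunk_limit == 0:
--             yield chunk
--             chunk = []
--
--     if chunk:
--         yield chunk
-- ===== SOURCE B (Python) =====
-- from typing import Generator, List, Tuple
--
--
-- def _isqrt(n: int) -> int:
--     """Floor integer square root by Newton's iteration (no math import in this module)."""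
--     if n <= 1:
--         return n
--     x = n
--     y = (x + n // x) // 2
--     while y < x:
--         x = y
--         y = (x + n // x) // 2
--     return x
--
--
-- def _pair(num_paths: int, total: int, t: int) -> Tuple[int, int]:
--     """Closed-form unranking: the t-th pair (0-based) of the i<j enumeration.
--
--     Counting m = total-1-t pairs from the END, rows from the end have sizes
--     1, 2, 3, ..., so the row index from the end is the triangular root of m.
--     """
--     m = total - 1 - t
--     r = (_isqrt(8 * m + 1) - 1) // 2
--     i = num_paths - 2 - r
--     j = num_paths - 1 - (m - r * (r + 1) // 2)
--     return (i, j)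
--
--
-- def get_batch_of_paths(
--     num_paths: int, chunk_limit: int = 5000000
-- ) -> Generator[List[Tuple[int, int]], None, None]:
--     """Yield chunks of index pairs, each pair computed directly from its rank."""
--     total = num_paths * (num_paths - 1) // 2 if num_paths >= 2 else 0
--     num_chunks = -(-total // chunk_limit)  # ceil(total / chunk_limit)
--     for k in range(num_chunks):
--         start = k * chunk_limit
--         yield [_pair(num_paths, total, t)
--                for t in range(start, min(start + chunk_limit, total))]
-- ===== Notes on version B (the rewrite author's own statement) =====
-- stated objective: alternative
-- what changed: Replaces A's streamed pair generator with modulo-counter accumulation by closed-form random access: the chunk count and each chunk's pair are computed directly from the pair's rank via triangular-number unranking (integer square root), no pair stream or counter at all.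
-- outside the precondition, e.g. on get_batch_of_paths(1, 0): A returns [], B raises ZeroDivisionError; on get_batch_of_paths(3, -2): A returns [[(0, 1), (0, 2)], [(1, 2)]], B returns []
import Mathlib
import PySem

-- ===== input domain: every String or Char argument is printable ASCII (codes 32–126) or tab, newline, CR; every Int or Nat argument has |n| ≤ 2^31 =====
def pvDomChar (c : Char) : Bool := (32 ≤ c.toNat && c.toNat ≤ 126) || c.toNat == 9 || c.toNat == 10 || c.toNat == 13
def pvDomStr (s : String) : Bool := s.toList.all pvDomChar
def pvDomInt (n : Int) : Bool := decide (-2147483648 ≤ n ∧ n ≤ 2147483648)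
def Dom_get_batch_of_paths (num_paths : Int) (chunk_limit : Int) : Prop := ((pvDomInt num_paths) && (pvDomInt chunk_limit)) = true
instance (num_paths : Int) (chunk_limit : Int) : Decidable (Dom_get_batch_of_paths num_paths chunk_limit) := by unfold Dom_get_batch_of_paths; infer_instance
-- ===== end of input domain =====

-- B replaces A's streamed pair generator + modulo counter by closed-form unranking: each
-- chunk's pairs are computed directly from their rank via an integer square root
-- (triangular-root), with the chunk count computed by ceiling division; alternative
-- algorithm, same chunks. Equivalence is about the yielded chunk list.

-- ===== PORT A =====
-- pair_generator: nested for-loops yielding (i, j); collected as the list of yields.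
def pv_pair_generator (num_paths : Int) (start : Int) : List (Int × Int) :=
  (PySem.List.pyRange start num_paths 1).foldl (fun acc i =>
    (PySem.List.pyRange (i + 1) num_paths 1).foldl (fun acc2 j => acc2 ++ [(i, j)]) acc) []

def get_batch_of_paths (num_paths : Int) (chunk_limit : Int) : List (List (Int × Int)) :=
  let pairs := pv_pair_generator num_paths 0
  let st := (PySem.List.enumerate pairs 1).foldl
    (fun (st : List (List (Int × Int)) × List (Int × Int)) p =>
      let chunk := st.2 ++ [p.2]
      if PySem.Int.mod p.1 chunk_limit = 0 then (st.1 ++ [chunk], []) else (st.1, chunk))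
    ([], [])
  if st.2 = [] then st.1 else st.1 ++ [st.2]

-- ===== PORT B =====
-- _isqrt: Newton's iteration; the while-loop as fuelled recursion (fuel n.toNat + 1 is
-- provably enough: x strictly decreases and stays ≥ 1; guard for totality only).
def pv_isqrt_iter : Nat → Int → Int → Int
  | 0, _, x => x
  | fuel + 1, n, x =>
    let y := PySem.Int.floordiv (x + PySem.Int.floordiv n x) 2
    if y < x then pv_isqrt_iter fuel n y else x

def pv_isqrt (n : Int) : Int :=
  if n ≤ 1 then n else pv_isqrt_iter (n.toNat + 1) n n

-- _pair: closed-form unranking of the t-th pair.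
def pv_pair (num_paths : Int) (total : Int) (t : Int) : Int × Int :=
  let m := total - 1 - t
  let r := PySem.Int.floordiv (pv_isqrt (8 * m + 1) - 1) 2
  (num_paths - 2 - r, num_paths - 1 - (m - PySem.Int.floordiv (r * (r + 1)) 2))

def get_batch_of_paths_alt (num_paths : Int) (chunk_limit : Int) : List (List (Int × Int)) :=
  let total := if 2 ≤ num_paths then PySem.Int.floordiv (num_paths * (num_paths - 1)) 2 else 0
  let num_chunks := -(PySem.Int.floordiv (-total) chunk_limit)
  (PySem.List.pyRange 0 num_chunks 1).map (fun k =>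
    let start := k * chunk_limit
    (PySem.List.pyRange start (min (start + chunk_limit) total) 1).map
      (pv_pair num_paths total))

-- ===== PRECONDITION & SPEC =====
-- Pre_ restricts to the natural domain chunk_limit ≥ 1, except that it keeps the inputs
-- with no pairs and a negative limit (where both return []): it excludes chunk_limit = 0,
-- where B's ceiling division raises ZeroDivisionError while A raises too or returns [],
-- and negative chunk_limit with pairs present, where A's modulo counter happens to chunk
-- by |chunk_limit| while B yields nothing — a nonsensical chunk size no caller would specify.
def Pre_get_batch_of_paths (num_paths : Int) (chunk_limit : Int) : Prop :=
  1 ≤ chunk_limit ∨ (chunk_limit ≤ -1 ∧ num_paths ≤ 1)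
instance (num_paths : Int) (chunk_limit : Int) : Decidable (Pre_get_batch_of_paths num_paths chunk_limit) := by unfold Pre_get_batch_of_paths; infer_instance
def pvWitness_get_batch_of_paths : Int × Int := (3, 2)

def Spec_get_batch_of_paths (num_paths : Int) (chunk_limit : Int) (out : List (List (Int × Int))) : Prop := out = get_batch_of_paths_alt num_paths chunk_limit
instance (num_paths : Int) (chunk_limit : Int) (out : List (List (Int × Int))) : Decidable (Spec_get_batch_of_paths num_paths chunk_limit out) := by unfold Spec_get_batch_of_paths; infer_instance

-- ===== CLAIM (what is proved, stated in full; the proofs are below) =====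
def Claim_equal_get_batch_of_paths : Prop := ∀ (num_paths : Int) (chunk_limit : Int), Dom_get_batch_of_paths num_paths chunk_limit → Pre_get_batch_of_paths num_paths chunk_limit → Spec_get_batch_of_paths num_paths chunk_limit (get_batch_of_paths num_paths chunk_limit)

-- ===== LEMMAS AND PROOFS =====

-- the flat i<j pair list, as A's generator produces it
def pv_combos2 : List Int → List (Int × Int)
  | [] => []
  | x :: xs => xs.map (fun y => (x, y)) ++ pv_combos2 xs

-- chunking by take/drop (proof-side bridge between the two programs' shapes)
def pv_batches_go : Nat → Int → List (Int × Int) → List (List (Int × Int))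
  | 0, _, _ => []
  | fuel + 1, cl, xs =>
    let c := xs.take cl.toNat
    if c = [] then [] else c :: pv_batches_go fuel cl (xs.drop cl.toNat)

def pv_batches (cl : Int) (xs : List (Int × Int)) : List (List (Int × Int)) :=
  pv_batches_go xs.length cl xs

-- triangular numbers (clamped to 0 on negative arguments)
def pv_TI (k : Int) : Int := PySem.Int.floordiv (k * (k + 1)) 2
def pv_TIc (k : Int) : Int := if 0 ≤ k then pv_TI k else 0

def pv_total (n : Int) : Int :=
  if 2 ≤ n then PySem.Int.floordiv (n * (n - 1)) 2 else 0

theorem pv_gen_eq (n : Int) : ∀ (fuel : Nat) (a : Int) (acc : List (Int × Int)), (n - a).toNat = fuel →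
    (PySem.List.pyRange a n 1).foldl (fun acc i =>
      (PySem.List.pyRange (i + 1) n 1).foldl (fun acc2 j => acc2 ++ [(i, j)]) acc) acc
    = acc ++ pv_combos2 (PySem.List.pyRange a n 1) := by
  intro fuel
  induction fuel with
  | zero =>
    intro a acc h
    rw [PySem.List.pyRange_one_eq_nil (by omega)]
    simp [pv_combos2]
  | succ f ih =>
    intro a acc h
    rw [PySem.List.pyRange_one_cons (by omega)]
    simp only [List.foldl_cons, pv_combos2]
    rw [PySem.List.foldl_append_singleton_eq_map (Prod.mk a) _ acc]
    rw [ih (a + 1) _ (by omega)]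
    simp

theorem pv_go_stable (cl : Int) (hcl : 1 ≤ cl) :
    ∀ (fuel : Nat) (xs : List (Int × Int)) (fuel2 : Nat),
      xs.length ≤ fuel → xs.length ≤ fuel2 →
    pv_batches_go fuel cl xs = pv_batches_go fuel2 cl xs := by
  intro fuel
  induction fuel with
  | zero =>
    intro xs fuel2 h1 _
    have : xs = [] := by simpa using List.length_eq_zero_iff.mp (by omega)
    subst this
    cases fuel2 <;> simp [pv_batches_go]
  | succ f ih =>
    intro xs fuel2 h1 h2
    match xs, fuel2 with
    | [], fuel2 => cases fuel2 <;> simp [pv_batches_go]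
    | x :: xs, fuel2 + 1 =>
      have hne : (x :: xs).take cl.toNat ≠ [] := by
        simp [List.take_eq_nil_iff]; omega
      have hd : ((x :: xs).drop cl.toNat).length ≤ f ∧ ((x :: xs).drop cl.toNat).length ≤ fuel2 := by
        simp only [List.length_drop, List.length_cons] at *
        omega
      simp only [pv_batches_go, if_neg hne]
      rw [ih _ fuel2 hd.1 hd.2]

theorem pv_batches_nil (cl : Int) : pv_batches cl [] = [] := by
  simp [pv_batches, pv_batches_go]

theorem pv_batches_cons (cl : Int) (hcl : 1 ≤ cl) (xs : List (Int × Int)) (hxs : xs ≠ []) :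
    pv_batches cl xs = xs.take cl.toNat :: pv_batches cl (xs.drop cl.toNat) := by
  match xs with
  | x :: xs =>
    have hne : (x :: xs).take cl.toNat ≠ [] := by
      simp [List.take_eq_nil_iff]; omega
    simp only [pv_batches, List.length_cons, pv_batches_go, if_neg hne]
    rw [pv_go_stable cl hcl xs.length _ ((x :: xs).drop cl.toNat).length
      (by simp only [List.length_drop, List.length_cons]; omega) (le_refl _)]

theorem pv_loop (cl : Int) (hcl : 1 ≤ cl) (xs : List (Int × Int)) :
    ∀ (c : List (Int × Int)) (out : List (List (Int × Int))) (idx : Int),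
    (c.length : Int) < cl → PySem.Int.mod (idx - 1) cl = (c.length : Int) →
    (if (List.foldl
          (fun (st : List (List (Int × Int)) × List (Int × Int)) (p : Int × (Int × Int)) =>
            if PySem.Int.mod p.1 cl = 0 then (st.1 ++ [st.2 ++ [p.2]], []) else (st.1, st.2 ++ [p.2]))
          (out, c) (PySem.List.enumerate xs idx)).2 = []
     then (List.foldl
          (fun (st : List (List (Int × Int)) × List (Int × Int)) (p : Int × (Int × Int)) =>
            if PySem.Int.mod p.1 cl = 0 then (st.1 ++ [st.2 ++ [p.2]], []) else (st.1, st.2 ++ [p.2]))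
          (out, c) (PySem.List.enumerate xs idx)).1
     else (List.foldl
          (fun (st : List (List (Int × Int)) × List (Int × Int)) (p : Int × (Int × Int)) =>
            if PySem.Int.mod p.1 cl = 0 then (st.1 ++ [st.2 ++ [p.2]], []) else (st.1, st.2 ++ [p.2]))
          (out, c) (PySem.List.enumerate xs idx)).1 ++
        [(List.foldl
          (fun (st : List (List (Int × Int)) × List (Int × Int)) (p : Int × (Int × Int)) =>
            if PySem.Int.mod p.1 cl = 0 then (st.1 ++ [st.2 ++ [p.2]], []) else (st.1, st.2 ++ [p.2]))
          (out, c) (PySem.List.enumerate xs idx)).2])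
      = out ++ pv_batches cl (c ++ xs) := by
  induction xs with
  | nil =>
    intro c out idx hlt _
    simp only [PySem.List.enumerate_nil, List.foldl_nil, List.append_nil]
    by_cases hc : c = []
    · subst hc; simp [pv_batches_nil]
    · rw [if_neg hc, pv_batches_cons cl hcl c hc,
        List.take_of_length_le (by omega), List.drop_of_length_le (by omega), pv_batches_nil]
  | cons p ps ih =>
    intro c out idx hlt hmod
    rw [PySem.Int.mod_eq_emod_of_pos (by omega)] at hmod
    have hmodi : PySem.Int.mod idx cl = (idx % cl) := PySem.Int.mod_eq_emod_of_pos (by omega)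
    have e1 : idx % cl = ((c.length : Int) + 1) % cl := by
      have h := Int.emod_add_mul_ediv (idx - 1) cl
      rw [show idx = (idx - 1) % cl + 1 + cl * ((idx - 1) / cl) by omega,
        Int.add_mul_emod_self_left, hmod]
    simp only [PySem.List.enumerate_cons, List.foldl_cons]
    by_cases hfull : (c.length : Int) + 1 = cl
    · have hz' : idx % cl = 0 := by rw [e1, hfull, Int.emod_self]
      have hzero : PySem.Int.mod idx cl = 0 := hmodi.trans hz'
      rw [if_pos hzero]
      rw [ih [] (out ++ [c ++ [p]]) (idx + 1) (by simp; omega)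
        (by rw [PySem.Int.mod_eq_emod_of_pos (by omega), add_sub_cancel_right]
            simpa using hz')]
      rw [show c ++ p :: ps = (c ++ [p]) ++ ps by simp,
        pv_batches_cons cl hcl ((c ++ [p]) ++ ps) (by simp),
        List.take_left' (by simp only [List.length_append, List.length_cons, List.length_nil]; omega),
        List.drop_left' (by simp only [List.length_append, List.length_cons, List.length_nil]; omega)]
      simp
    · have hkeep : idx % cl = (c.length : Int) + 1 := by
        rw [e1, Int.emod_eq_of_lt (by omega) (by omega)]
      have hnz : ¬ PySem.Int.mod idx cl = 0 := by rw [hmodi, hkeep]; omega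
      rw [if_neg hnz]
      rw [ih (c ++ [p]) out (idx + 1)
        (by simp only [List.length_append, List.length_cons, List.length_nil]; omega)
        (by rw [PySem.Int.mod_eq_emod_of_pos (by omega), add_sub_cancel_right, hkeep]
            simp only [List.length_append, List.length_cons, List.length_nil]
            push_cast; ring)]
      simp

-- ---- isqrt spec ----

theorem pv_isqrt_iter_spec : ∀ (fuel : Nat) (n x s : Int), 0 ≤ s → s * s ≤ n →
    n < (s + 1) * (s + 1) → s ≤ x → x ≤ n → 1 ≤ x → x.toNat < fuel →
    pv_isqrt_iter fuel n x = s := by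
  intro fuel
  induction fuel with
  | zero => intro n x s _ _ _ _ _ _ hf; omega
  | succ fl ih =>
    intro n x s hs hsn hns hsx hxn hx hf
    simp only [pv_isqrt_iter]
    have hx0 : (0:Int) < x := by omega
    have hdn : 0 ≤ PySem.Int.floordiv n x := by
      rw [PySem.Int.floordiv_eq_ediv_of_pos hx0]
      exact Int.ediv_nonneg (by omega) (by omega)
    have hsy : s ≤ PySem.Int.floordiv (x + PySem.Int.floordiv n x) 2 := by
      rw [PySem.Int.le_floordiv_iff_mul_le (by norm_num)]
      by_cases hcase : 2 * s - x ≤ 0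
      · omega
      · have h2 : 2 * s - x ≤ PySem.Int.floordiv n x := by
          rw [PySem.Int.le_floordiv_iff_mul_le hx0]
          nlinarith
        omega
    by_cases hyx : PySem.Int.floordiv (x + PySem.Int.floordiv n x) 2 < x
    · rw [if_pos hyx]
      have hs1 : 1 ≤ s := by nlinarith
      exact ih n _ s hs hsn hns hsy (by omega) (by omega) (by omega)
    · rw [if_neg hyx]
      by_contra hne
      have hsx1 : s + 1 ≤ x := by
        rcases lt_or_eq_of_le hsx with h | h
        · omega
        · exact absurd h.symm hne
      have hnx : n < x * x := by nlinarith
      have hfdx : PySem.Int.floordiv n x < x := by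
        rw [PySem.Int.floordiv_lt_iff_lt_mul hx0]
        nlinarith
      have hup : PySem.Int.floordiv (x + PySem.Int.floordiv n x) 2 ≤ x - 1 := by
        rw [PySem.Int.floordiv_eq_ediv_of_pos (by norm_num : (0:Int) < 2)]
        have := Int.ediv_le_ediv (by norm_num : (0:Int) < 2)
          (show x + PySem.Int.floordiv n x ≤ 2 * x - 1 by omega)
        omega
      omega

theorem pv_isqrt_spec (n : Int) (h : 1 ≤ n) :
    0 ≤ pv_isqrt n ∧ pv_isqrt n * pv_isqrt n ≤ n ∧ n < (pv_isqrt n + 1) * (pv_isqrt n + 1) := by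
  unfold pv_isqrt
  by_cases h1 : n ≤ 1
  · have hn1 : n = 1 := by omega
    subst hn1
    norm_num
  · rw [if_neg h1]
    set s : Int := (Nat.sqrt n.toNat : Int) with hsdef
    have hs0 : 0 ≤ s := by positivity
    have hle : s * s ≤ n := by
      have := Nat.sqrt_le' n.toNat
      rw [pow_two] at this
      have hcast : ((Nat.sqrt n.toNat * Nat.sqrt n.toNat : Nat) : Int) ≤ ((n.toNat : Nat) : Int) := by
        exact_mod_cast this
      push_cast at hcast
      rw [Int.toNat_of_nonneg (by omega)] at hcast
      exact hcast
    have hlt : n < (s + 1) * (s + 1) := by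
      have := Nat.lt_succ_sqrt' n.toNat
      rw [pow_two, Nat.succ_eq_add_one] at this
      have hcast : ((n.toNat : Nat) : Int) < (((Nat.sqrt n.toNat + 1) * (Nat.sqrt n.toNat + 1) : Nat) : Int) := by
        exact_mod_cast this
      push_cast at hcast
      rw [Int.toNat_of_nonneg (by omega)] at hcast
      exact hcast
    have hsn : s ≤ n := by
      have h' := Nat.sqrt_le_self n.toNat
      have h'' : ((Nat.sqrt n.toNat : Nat) : Int) ≤ ((n.toNat : Nat) : Int) := by exact_mod_cast h'
      rw [Int.toNat_of_nonneg (by omega)] at h''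
      exact h''
    rw [pv_isqrt_iter_spec (n.toNat + 1) n n s hs0 hle hlt hsn le_rfl (by omega) (by omega)]
    exact ⟨hs0, hle, hlt⟩

-- ---- triangular facts ----

theorem pv_TI_succ (k : Int) : pv_TI (k + 1) = pv_TI k + (k + 1) := by
  unfold pv_TI
  rw [PySem.Int.floordiv_eq_ediv_of_pos (by norm_num),
    PySem.Int.floordiv_eq_ediv_of_pos (by norm_num),
    show (k + 1) * (k + 1 + 1) = k * (k + 1) + 2 * (k + 1) by ring]
  generalize k * (k + 1) = p
  omega

theorem pv_TI_nonneg (k : Int) (h : 0 ≤ k) : 0 ≤ pv_TI k := by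
  unfold pv_TI
  rw [PySem.Int.floordiv_eq_ediv_of_pos (by norm_num)]
  exact Int.ediv_nonneg (by nlinarith) (by norm_num)

theorem pv_TIc_nonneg (k : Int) : 0 ≤ pv_TIc k := by
  unfold pv_TIc
  split
  · exact pv_TI_nonneg k (by omega)
  · omega

theorem pv_TIc_succ (k : Int) (h : 0 ≤ k) : pv_TIc k = pv_TIc (k - 1) + k := by
  unfold pv_TIc
  by_cases h1 : 1 ≤ k
  · rw [if_pos h, if_pos (by omega), show k = (k - 1) + 1 by ring, pv_TI_succ (k - 1)]
    ring_nf
  · have hk : k = 0 := by omega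
    subst hk
    norm_num
    unfold pv_TI
    decide

theorem pv_total_eq (n : Int) : pv_total n = pv_TIc (n - 1) := by
  unfold pv_total pv_TIc pv_TI
  by_cases h : 2 ≤ n
  · rw [if_pos h, if_pos (by omega), show (n - 1) * (n - 1 + 1) = n * (n - 1) by ring]
  · rw [if_neg h]
    by_cases h1 : n = 1
    · subst h1; decide
    · rw [if_neg (by omega)]

-- ---- unranking ----

theorem pv_pair_eval (n i j : Int) (_hi : 0 ≤ i) (hij : i < j) (hj : j < n) :
    pv_pair n (pv_total n) (pv_total n - pv_TI (n - 1 - i) + (j - i - 1)) = (i, j) := by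
  have hr0 : n - 1 - i = (n - 2 - i) + 1 := by ring
  set r0 := n - 2 - i with hr0def
  have hr00 : 0 ≤ r0 := by omega
  have hTsucc := pv_TI_succ r0
  have hT0 := pv_TI_nonneg r0 hr00
  set T := pv_total n with hTdef
  rw [hr0]
  simp only [pv_pair]
  have hm : T - 1 - (T - pv_TI (r0 + 1) + (j - i - 1)) = pv_TI r0 + (r0 + 1) - (j - i) := by
    rw [hTsucc]; ring
  rw [hm]
  set m := pv_TI r0 + (r0 + 1) - (j - i) with hmdef
  have hji2 : j - i ≤ r0 + 1 := by omega
  have hm0 : 0 ≤ m := by omega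
  obtain ⟨c, hc⟩ : ∃ c, r0 * (r0 + 1) = 2 * c := by
    rcases Int.even_mul_succ_self r0 with ⟨c, hc⟩
    exact ⟨c, by omega⟩
  have hTIr0 : pv_TI r0 = c := by
    unfold pv_TI
    rw [PySem.Int.floordiv_eq_ediv_of_pos (by norm_num), hc]
    omega
  have hq := pv_isqrt_spec (8 * m + 1) (by omega)
  set q := pv_isqrt (8 * m + 1) with hqdef
  have hsq1 : (2 * r0 + 1) * (2 * r0 + 1) = 8 * c + 1 := by linear_combination 4 * hc
  have hsq2 : (2 * r0 + 3) * (2 * r0 + 3) = 8 * c + 8 * (r0 + 1) + 1 := by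
    linear_combination 4 * hc
  have hql : 2 * r0 + 1 ≤ q := by
    by_contra hcon
    have hcon' : q ≤ 2 * r0 := by omega
    have h1 : (q + 1) * (q + 1) ≤ (2 * r0 + 1) * (2 * r0 + 1) := by nlinarith [hq.1]
    have h2 : 8 * c + 1 ≤ 8 * m + 1 := by omega
    linarith [hq.2.2]
  have hqu : q ≤ 2 * r0 + 2 := by
    by_contra hcon
    have hcon' : 2 * r0 + 3 ≤ q := by omega
    have h1 : (2 * r0 + 3) * (2 * r0 + 3) ≤ q * q := by nlinarith [hq.1]
    have h2 : 8 * m + 1 < 8 * c + 8 * (r0 + 1) + 1 := by omega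
    linarith [hq.2.1]
  have hr : PySem.Int.floordiv (q - 1) 2 = r0 := by
    rw [PySem.Int.floordiv_eq_ediv_of_pos (by norm_num)]
    omega
  rw [hr]
  have hTI2 : PySem.Int.floordiv (r0 * (r0 + 1)) 2 = pv_TI r0 := rfl
  rw [hTI2]
  rw [Prod.mk.injEq]
  constructor <;> omega

theorem pv_combos_eq (n : Int) : ∀ (fuel : Nat) (a : Int), 0 ≤ a → (n - a).toNat ≤ fuel →
    pv_combos2 (PySem.List.pyRange a n 1)
      = (PySem.List.pyRange (pv_total n - pv_TIc (n - 1 - a)) (pv_total n) 1).map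
          (pv_pair n (pv_total n)) := by
  intro fuel
  induction fuel with
  | zero =>
    intro a ha hf
    rw [PySem.List.pyRange_one_eq_nil (by omega),
      show pv_TIc (n - 1 - a) = 0 from if_neg (by omega), sub_zero,
      PySem.List.pyRange_one_eq_nil le_rfl]
    simp [pv_combos2]
  | succ fl ih =>
    intro a ha hf
    by_cases han : n ≤ a
    · rw [PySem.List.pyRange_one_eq_nil (by omega),
        show pv_TIc (n - 1 - a) = 0 from if_neg (by omega), sub_zero,
        PySem.List.pyRange_one_eq_nil le_rfl]
      simp [pv_combos2]
    · rw [PySem.List.pyRange_one_cons (by omega)]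
      simp only [pv_combos2]
      rw [ih (a + 1) (by omega) (by omega)]
      rw [show n - 1 - (a + 1) = n - 2 - a by ring]
      have hk1 : pv_TIc (n - 1 - a) = pv_TIc (n - 2 - a) + (n - 1 - a) := by
        have h := pv_TIc_succ (n - 1 - a) (by omega)
        rw [show n - 1 - a - 1 = n - 2 - a by ring] at h
        exact h
      have h2 : 0 ≤ pv_TIc (n - 2 - a) := pv_TIc_nonneg _
      rw [PySem.List.pyRange_one_append (pv_total n - pv_TIc (n - 1 - a))
        (pv_total n - pv_TIc (n - 2 - a)) (pv_total n) (by omega) (by omega),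
        List.map_append]
      congr 1
      rw [PySem.List.pyRange_one (a + 1) n,
        PySem.List.pyRange_one (pv_total n - pv_TIc (n - 1 - a)) (pv_total n - pv_TIc (n - 2 - a))]
      rw [List.map_map, List.map_map]
      have hlen : (pv_total n - pv_TIc (n - 2 - a) - (pv_total n - pv_TIc (n - 1 - a))).toNat
          = (n - (a + 1)).toNat := by omega
      rw [hlen]
      apply List.map_congr_left
      intro k hk
      simp only [List.mem_range] at hk
      simp only [Function.comp]
      have hTIeq : pv_TIc (n - 1 - a) = pv_TI (n - 1 - a) := if_pos (by omega)
      have hpe := pv_pair_eval n a (a + 1 + (k : Int)) (by omega) (by omega) (by omega)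
      rw [show pv_total n - pv_TI (n - 1 - a) + (a + 1 + (k : Int) - a - 1)
          = pv_total n - pv_TI (n - 1 - a) + (k : Int) by ring] at hpe
      rw [hTIeq]
      exact hpe.symm

-- ---- chunking by closed-form boundaries ----

theorem pv_take_map_pyRange (f : Int → Int × Int) (k : Nat) (a b : Int) :
    ((PySem.List.pyRange a b 1).map f).take k
      = (PySem.List.pyRange a (min (a + k) b) 1).map f := by
  rw [PySem.List.pyRange_one a b, PySem.List.pyRange_one a (min (a + k) b)]
  rw [List.map_map, List.map_map, ← List.map_take, List.take_range]
  have hmin : min k (b - a).toNat = (min (a + ↑k) b - a).toNat := by omega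
  rw [hmin]

theorem pv_drop_map_pyRange (f : Int → Int × Int) (k : Nat) (a b : Int) :
    ((PySem.List.pyRange a b 1).map f).drop k
      = (PySem.List.pyRange (a + k) b 1).map f := by
  by_cases h : a + k ≤ b
  · rw [PySem.List.pyRange_one_append a (a + k) b (by omega) h, List.map_append,
      List.drop_left' (by simp [PySem.List.length_pyRange_one])]
  · rw [List.drop_of_length_le (by simp [PySem.List.length_pyRange_one]; omega),
      PySem.List.pyRange_one_eq_nil (by omega)]
    simp

theorem pv_batches_eq (cl total : Int) (hcl : 1 ≤ cl) (ht : 0 ≤ total)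
    (f : Int → Int × Int) :
    ∀ (fuel : Nat) (j : Int), 0 ≤ j →
      ((-(PySem.Int.floordiv (-total) cl)) - j).toNat ≤ fuel →
    pv_batches cl ((PySem.List.pyRange (j * cl) total 1).map f)
      = (PySem.List.pyRange j (-(PySem.Int.floordiv (-total) cl)) 1).map
          (fun k => (PySem.List.pyRange (k * cl) (min (k * cl + cl) total) 1).map f) := by
  have hnc := (PySem.Int.neg_floordiv_neg_eq_iff_of_pos (by omega : (0:Int) < cl)).mp
    (rfl : -(PySem.Int.floordiv (-total) cl) = -(PySem.Int.floordiv (-total) cl))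
  set nc := -(PySem.Int.floordiv (-total) cl) with hncdef
  have hnc0 : 0 ≤ nc := by nlinarith [hnc.1, hnc.2]
  intro fuel
  induction fuel with
  | zero =>
    intro j hj hf
    have hjnc : nc ≤ j := by omega
    have hjt : total ≤ j * cl := by nlinarith [hnc.2]
    rw [PySem.List.pyRange_one_eq_nil (by omega : total ≤ j * cl),
      PySem.List.pyRange_one_eq_nil (by omega : nc ≤ j)]
    simp [pv_batches_nil]
  | succ fl ih =>
    intro j hj hf
    by_cases hjnc : nc ≤ j
    · have hjt : total ≤ j * cl := by nlinarith [hnc.2]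
      rw [PySem.List.pyRange_one_eq_nil (by omega : total ≤ j * cl),
        PySem.List.pyRange_one_eq_nil (by omega : nc ≤ j)]
      simp [pv_batches_nil]
    · have hjlt : j * cl < total := by nlinarith [hnc.1]
      have hne : (PySem.List.pyRange (j * cl) total 1).map f ≠ [] := by
        rw [PySem.List.pyRange_one_cons hjlt]; simp
      rw [pv_batches_cons cl hcl _ hne,
        pv_take_map_pyRange f cl.toNat (j * cl) total,
        pv_drop_map_pyRange f cl.toNat (j * cl) total,
        show ((cl.toNat : Int)) = cl from Int.toNat_of_nonneg (by omega)]
      rw [PySem.List.pyRange_one_cons (by omega : j < nc), List.map_cons]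
      congr 1
      rw [show j * cl + cl = (j + 1) * cl by ring]
      exact ih (j + 1) (by omega) (by omega)

-- ===== VERDICT (by name: the statement is the Claim_ definition above) =====
theorem get_batch_of_paths_spec : Claim_equal_get_batch_of_paths := by
  intro n cl _ hpre
  unfold Spec_get_batch_of_paths get_batch_of_paths get_batch_of_paths_alt
  rcases hpre with hcl | ⟨hneg, hn1⟩
  case inr =>
    have hgen : pv_pair_generator n 0 = [] := by
      by_cases hn0 : n ≤ 0
      · unfold pv_pair_generator
        rw [PySem.List.pyRange_one_eq_nil (by omega)]
        rfl
      · have h1 : n = 1 := by omega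
        subst h1
        decide
    simp only [hgen, PySem.List.enumerate_nil, List.foldl_nil,
      if_neg (show ¬(2:Int) ≤ n by omega), neg_zero]
    rw [show PySem.Int.floordiv (0:Int) cl = 0 by
          unfold PySem.Int.floordiv; exact Int.zero_fdiv cl,
      neg_zero, PySem.List.pyRange_one_eq_nil le_rfl]
    simp
  have ht : 0 ≤ pv_total n := by
    unfold pv_total
    split
    · rw [PySem.Int.floordiv_eq_ediv_of_pos (by omega)]
      exact Int.ediv_nonneg (by nlinarith) (by omega)
    · omega
  have hpairs : pv_pair_generator n 0
      = (PySem.List.pyRange 0 (pv_total n) 1).map (pv_pair n (pv_total n)) := by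
    unfold pv_pair_generator
    rw [pv_gen_eq n (n - 0).toNat 0 [] rfl]
    rw [pv_combos_eq n (n - 0).toNat 0 le_rfl (by omega)]
    rw [show n - 1 - 0 = n - 1 by ring, ← pv_total_eq]
    simp
  have hA := pv_loop cl hcl (pv_pair_generator n 0) [] [] 1 (by simp; omega)
    (by rw [PySem.Int.mod_eq_emod_of_pos (by omega)]; simp)
  simp only [List.nil_append] at hA
  rw [hA, hpairs]
  have hB := pv_batches_eq cl (pv_total n) hcl ht (pv_pair n (pv_total n))
    ((-(PySem.Int.floordiv (-(pv_total n)) cl)) - 0).toNat 0 le_rfl le_rfl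
  rw [show (0 : Int) * cl = 0 by ring] at hB
  unfold pv_total at hB ht hpairs ⊢
  exact hB
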